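-- pv_equiv track=rewrite | github.com/mpsilamartin/mpsilamartin.github.io | info/DS/DS04_2021_2022_nom.py | pyramide
-- ===== SOURCE A (Python) =====
-- def pyramide(alpha,n):
--     """Construit la pyramide a n ligne"""
--     p = []
--     x = alpha
--     for i in range(n):
--         l = []
--         for j in range(i+1) :
--             y = x % 10
--             l.append(y)
--             x = (15091 * x) % 64007
--         p.append(l)
--     return p
-- ===== SOURCE B (Python) =====
-- def pyramide(alpha, n):
--     """Generate all digits flat with the LCG, then partition into rows."""
--     m = max(n, 0)
--     total = m * (m + 1) // 2
--     digits = []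
--     x = alpha
--     for _ in range(total):
--         digits.append(x % 10)
--         x = (15091 * x) % 64007
--     p = []
--     off = 0
--     for i in range(n):
--         p.append(digits[off:off + i + 1])
--         off += i + 1
--     return p
-- ===== Notes on version B (the rewrite author's own statement) =====
-- stated objective: alternative
-- what changed: B separates digit generation from row construction: one flat loop advances the LCG n*(n+1)//2 times building a single digit list, then a second loop partitions it into slices of lengths 1..n, instead of A's nested loops interleaving generation and row building.
import Mathlib
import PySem

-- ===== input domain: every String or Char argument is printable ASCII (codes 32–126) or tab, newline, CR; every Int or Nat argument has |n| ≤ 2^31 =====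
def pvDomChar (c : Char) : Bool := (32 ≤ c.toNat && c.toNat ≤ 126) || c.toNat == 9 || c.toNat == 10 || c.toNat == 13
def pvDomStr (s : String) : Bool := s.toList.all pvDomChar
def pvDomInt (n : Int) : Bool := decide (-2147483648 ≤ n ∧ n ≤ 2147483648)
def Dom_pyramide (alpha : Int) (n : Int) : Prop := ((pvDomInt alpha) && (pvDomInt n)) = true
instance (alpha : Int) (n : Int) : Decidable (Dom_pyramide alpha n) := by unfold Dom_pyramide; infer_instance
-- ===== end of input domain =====

-- B separates digit generation from row construction (one flat LCG loop, then a
-- partition loop over slices); same digits, same rows; alternative decomposition,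
-- no speed claim.

-- ===== PORT A =====
-- nested loops: for each row i, generate i+1 digits while advancing the LCG state
def pyramide (alpha : Int) (n : Int) : List (List Int) :=
  ((PySem.List.pyRange 0 n 1).foldl
    (fun (acc : List (List Int) × Int) (i : Int) =>
      let inner := (PySem.List.pyRange 0 (i + 1) 1).foldl
        (fun (acc2 : List Int × Int) (_j : Int) =>
          (acc2.1 ++ [PySem.Int.mod acc2.2 10], PySem.Int.mod (15091 * acc2.2) 64007))
        ([], acc.2)
      (acc.1 ++ [inner.1], inner.2))
    ([], alpha)).1

-- ===== PORT B =====
-- flat generation of all n*(n+1)//2 digits, then partition into slices of lengths 1..n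
def pyramide_alt (alpha : Int) (n : Int) : List (List Int) :=
  let m := max n 0
  let total := PySem.Int.floordiv (m * (m + 1)) 2
  let digits := ((PySem.List.pyRange 0 total 1).foldl
    (fun (acc : List Int × Int) (_k : Int) =>
      (acc.1 ++ [PySem.Int.mod acc.2 10], PySem.Int.mod (15091 * acc.2) 64007))
    ([], alpha)).1
  ((PySem.List.pyRange 0 n 1).foldl
    (fun (acc : List (List Int) × Int) (i : Int) =>
      (acc.1 ++ [PySem.List.slice digits (some acc.2) (some (acc.2 + i + 1))],
       acc.2 + i + 1))
    ([], (0 : Int))).1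

-- ===== PRECONDITION & SPEC =====
def Spec_pyramide (alpha : Int) (n : Int) (out : List (List Int)) : Prop := out = pyramide_alt alpha n
instance (alpha : Int) (n : Int) (out : List (List Int)) : Decidable (Spec_pyramide alpha n out) := by unfold Spec_pyramide; infer_instance

-- ===== CLAIM (what is proved, stated in full; the proofs are below) =====
def Claim_equal_pyramide : Prop := ∀ (alpha : Int) (n : Int), Dom_pyramide alpha n → Spec_pyramide alpha n (pyramide alpha n)

-- ===== LEMMAS AND PROOFS =====

-- the LCG step and the digit it emits
def pvStep (x : Int) : Int := PySem.Int.mod (15091 * x) 64007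

-- the stream of k digits starting from state x
def pvGen (x : Int) : Nat → List Int
  | 0 => []
  | k + 1 => PySem.Int.mod x 10 :: pvGen (pvStep x) k

-- triangular numbers: total digits in the first m rows
def pvT : Nat → Nat
  | 0 => 0
  | m + 1 => pvT m + (m + 1)

-- reference pyramid: row m is the m+1 digits starting at state pvStep^[pvT m] x
def pvAr (x : Int) : Nat → List (List Int)
  | 0 => []
  | m + 1 => pvAr x m ++ [pvGen (pvStep^[pvT m] x) (m + 1)]

-- reference partition of a digit list D into slices of lengths 1..m
def pvQr (D : List Int) : Nat → List (List Int)
  | 0 => []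
  | m + 1 => pvQr D m ++ [PySem.List.slice D (some ((pvT m : Nat) : Int)) (some (((pvT m : Nat) : Int) + (m : Int) + 1))]

theorem pvGen_length (x : Int) (k : Nat) : (pvGen x k).length = k := by
  induction k generalizing x with
  | zero => rfl
  | succ k ih => simp [pvGen, ih]

theorem pvGen_add (x : Int) (k m : Nat) :
    pvGen x (k + m) = pvGen x k ++ pvGen (pvStep^[k] x) m := by
  induction k generalizing x with
  | zero => simp [pvGen]
  | succ k ih =>
    have : k + 1 + m = (k + m) + 1 := by omega
    rw [this]
    simp only [pvGen, ih (pvStep x), Function.iterate_succ_apply]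
    rfl

-- both versions' digit-generating fold (the same body) over any list of length k
theorem pvInner (L : List Int) (l : List Int) (x : Int) :
    L.foldl
      (fun (acc2 : List Int × Int) (_j : Int) =>
        (acc2.1 ++ [PySem.Int.mod acc2.2 10], PySem.Int.mod (15091 * acc2.2) 64007))
      (l, x)
    = (l ++ pvGen x L.length, pvStep^[L.length] x) := by
  induction L generalizing l x with
  | nil => simp [pvGen]
  | cons a L ih =>
    simp only [List.foldl_cons, List.length_cons, ih]
    rw [Function.iterate_succ_apply]
    simp [pvGen, pvStep]

theorem pvT_double (m : Nat) : 2 * pvT m = m * (m + 1) := by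
  induction m with
  | zero => rfl
  | succ m ih => simp only [pvT]; nlinarith [ih]

-- A's outer loop
theorem pvAfold (x : Int) (m : Nat) :
    (PySem.List.pyRange 0 (m : Int) 1).foldl
      (fun (acc : List (List Int) × Int) (i : Int) =>
        let inner := (PySem.List.pyRange 0 (i + 1) 1).foldl
          (fun (acc2 : List Int × Int) (_j : Int) =>
            (acc2.1 ++ [PySem.Int.mod acc2.2 10], PySem.Int.mod (15091 * acc2.2) 64007))
          ([], acc.2)
        (acc.1 ++ [inner.1], inner.2))
      ([], x)
    = (pvAr x m, pvStep^[pvT m] x) := by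
  induction m with
  | zero =>
    rw [PySem.List.pyRange_one_eq_nil (by omega)]
    rfl
  | succ m ih =>
    have hc : ((m + 1 : Nat) : Int) = (m : Int) + 1 := by push_cast; ring
    rw [hc, PySem.List.pyRange_one_succ_right (by positivity), List.foldl_append, ih]
    simp only [List.foldl_cons, List.foldl_nil]
    rw [pvInner]
    have hlen : (PySem.List.pyRange 0 ((m : Int) + 1) 1).length = m + 1 := by
      rw [PySem.List.length_pyRange_one]; omega
    rw [hlen]
    have hiter : pvStep^[m + 1] (pvStep^[pvT m] x) = pvStep^[pvT (m + 1)] x := by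
      rw [← Function.iterate_add_apply]
      congr 1
      simp [pvT]; omega
    simp [pvAr, hiter]

-- B's partition loop
theorem pvBfold (D : List Int) (m : Nat) :
    (PySem.List.pyRange 0 (m : Int) 1).foldl
      (fun (acc : List (List Int) × Int) (i : Int) =>
        (acc.1 ++ [PySem.List.slice D (some acc.2) (some (acc.2 + i + 1))],
         acc.2 + i + 1))
      ([], (0 : Int))
    = (pvQr D m, ((pvT m : Nat) : Int)) := by
  induction m with
  | zero =>
    rw [PySem.List.pyRange_one_eq_nil (by omega)]
    rfl
  | succ m ih =>
    have hc : ((m + 1 : Nat) : Int) = (m : Int) + 1 := by push_cast; ring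
    rw [hc, PySem.List.pyRange_one_succ_right (by positivity), List.foldl_append, ih]
    simp only [List.foldl_cons, List.foldl_nil]
    have hT : ((pvT m : Nat) : Int) + (m : Int) + 1 = ((pvT (m + 1) : Nat) : Int) := by
      push_cast [pvT]; ring
    simp [pvQr, hT]

-- a slice of the full digit stream is the corresponding row
theorem pvSliceRow (x : Int) (K m : Nat) (h : pvT m + (m + 1) ≤ K) :
    PySem.List.slice (pvGen x K) (some ((pvT m : Nat) : Int)) (some (((pvT m : Nat) : Int) + (m : Int) + 1))
    = pvGen (pvStep^[pvT m] x) (m + 1) := by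
  have hb : ((pvT m : Nat) : Int) + (m : Int) + 1 = ((pvT m : Nat) : Int) + ((m + 1 : Nat) : Int) := by
    push_cast; ring
  rw [hb, PySem.List.slice_natCast_add]
  have hK : K = pvT m + ((m + 1) + (K - pvT m - (m + 1))) := by omega
  rw [hK, pvGen_add]
  rw [List.drop_left' (by rw [pvGen_length])]
  rw [pvGen_add]
  rw [List.take_left' (by rw [pvGen_length])]

-- partitioning the stream reproduces A's rows
theorem pvQA (x : Int) (m K : Nat) (h : pvT m ≤ K) :
    pvQr (pvGen x K) m = pvAr x m := by
  induction m with
  | zero => rfl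
  | succ m ih =>
    have hm : pvT m ≤ K := by simp [pvT] at h; omega
    have hrow : pvT m + (m + 1) ≤ K := by simp [pvT] at h; omega
    simp only [pvQr, pvAr, ih hm, pvSliceRow x K m hrow]

theorem pv_main (alpha n : Int) : pyramide alpha n = pyramide_alt alpha n := by
  by_cases hn : 0 ≤ n
  · obtain ⟨m, rfl⟩ : ∃ m : Nat, (m : Int) = n := ⟨n.toNat, Int.toNat_of_nonneg hn⟩
    have h2' : (m : Int) * ((m : Int) + 1) = 2 * ((pvT m : Nat) : Int) := by
      exact_mod_cast (pvT_double m).symm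
    have htotal : PySem.Int.floordiv (max (m : Int) 0 * (max (m : Int) 0 + 1)) 2 = ((pvT m : Nat) : Int) := by
      rw [max_eq_left (by positivity), PySem.Int.floordiv_eq_ediv_of_pos (by omega), h2']; omega
    simp only [pyramide, pyramide_alt]
    rw [pvAfold, htotal, pvInner]
    have hlen : (PySem.List.pyRange 0 ((pvT m : Nat) : Int) 1).length = pvT m := by
      rw [PySem.List.length_pyRange_one]; omega
    rw [hlen]
    simp only [List.nil_append]
    rw [pvBfold (pvGen alpha (pvT m)) m, pvQA alpha m (pvT m) le_rfl]
  · simp only [pyramide, pyramide_alt]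
    rw [PySem.List.pyRange_one_eq_nil (show n ≤ 0 by omega)]
    rfl

-- ===== VERDICT (by name: the statement is the Claim_ definition above) =====
theorem pyramide_spec : Claim_equal_pyramide := by
  intro alpha n _
  unfold Spec_pyramide
  exact pv_main alpha n
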